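-- pv_equiv track=rewrite | github.com/charlesduan/orangebook | match_ndc_ob.py | match_ingredient
-- ===== SOURCE A (Python) =====
-- def match_ingredient(ing, ing_dict):
--     words = ing.split(" ")
--     matches = [ i.split(" ") for i in ing_dict.keys() ]
--     for i in range(len(words)):
--         matches = [ m for m in matches if len(m) > i and m[i] == words[i] ]
--         if len(matches) == 1: return " ".join(matches[0])
--         if len(matches) == 0: return None
--     return None
-- ===== SOURCE B (Python) =====
-- def match_ingredient(ing, ing_dict):
--     words = ing.split(" ")
--     best_p = 0
--     best = None
--     unique = False
--     for key in ing_dict: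
--         kw = key.split(" ")
--         p = 0
--         while p < len(words) and p < len(kw) and kw[p] == words[p]:
--             p += 1
--         if p > best_p:
--             best_p, best, unique = p, kw, True
--         elif p == best_p and p > 0:
--             unique = False
--     return " ".join(best) if unique else None
-- ===== Notes on version B (the rewrite author's own statement) =====
-- stated objective: alternative
-- what changed: Replaced A's round-by-round filtering of candidate key lists (one list rebuild per word position) by a single key-major pass that computes each key's word-prefix-match length and tracks the strict argmax with a uniqueness flag; no intermediate candidate lists are built.
import Mathlib
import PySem

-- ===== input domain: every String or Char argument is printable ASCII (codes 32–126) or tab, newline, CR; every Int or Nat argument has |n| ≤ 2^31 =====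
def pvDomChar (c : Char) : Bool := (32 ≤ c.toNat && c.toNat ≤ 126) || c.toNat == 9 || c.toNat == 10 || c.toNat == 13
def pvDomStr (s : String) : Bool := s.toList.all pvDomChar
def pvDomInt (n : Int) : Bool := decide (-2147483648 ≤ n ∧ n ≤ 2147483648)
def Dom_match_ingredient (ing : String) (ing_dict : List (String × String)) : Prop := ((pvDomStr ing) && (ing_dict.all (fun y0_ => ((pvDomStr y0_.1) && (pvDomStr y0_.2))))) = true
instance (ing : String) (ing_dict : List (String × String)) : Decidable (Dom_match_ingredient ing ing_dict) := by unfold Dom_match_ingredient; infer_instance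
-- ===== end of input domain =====

-- B replaces A's per-word-position filtering of candidate key lists by a single key-major
-- argmax pass over the keys (same cost; a genuinely different traversal).

-- ===== PORT A =====
-- s.split(" "): the separator " " is nonempty, so PySem.Str.split? is always `some` (exact)
def pvSplit (s : String) : List String := (PySem.Str.split? s " ").getD []

-- the for-loop over range(len(words)) with early returns, fuel = remaining positions
def pvALoop (words : List String) : Nat → Nat → List (List String) → Option String
  | _, 0, _ => none
  | i, fuel + 1, mts =>
    let ms := mts.filter (fun m => decide (i < m.length) && (m.getD i "" == words.getD i ""))
    if ms.length = 1 then some (PySem.Str.join " " (ms.getD 0 []))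
    else if ms.length = 0 then none
    else pvALoop words (i + 1) fuel ms

def match_ingredient (ing : String) (ing_dict : List (String × String)) : Option String :=
  let words := pvSplit ing
  let mts := ((PySem.Dict.ofList ing_dict).keys).map (fun k => pvSplit k)
  pvALoop words 0 words.length mts

-- ===== PORT B =====
-- the while loop computing the prefix-match length of one key
def pvPrefLen : List String → List String → Nat
  | [], _ => 0
  | _, [] => 0
  | w :: ws, k :: ks => if k = w then pvPrefLen ws ks + 1 else 0

-- one iteration of B's for-loop: state = (best_p, best split words, unique)
def pvBStep (words : List String) (st : Nat × Option (List String) × Bool) (key : String) :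
    Nat × Option (List String) × Bool :=
  let kw := pvSplit key
  let p := pvPrefLen words kw
  if st.1 < p then (p, some kw, true)
  else if p = st.1 ∧ 0 < p then (st.1, st.2.1, false)
  else st

def match_ingredient_alt (ing : String) (ing_dict : List (String × String)) : Option String :=
  let words := pvSplit ing
  let st := ((PySem.Dict.ofList ing_dict).keys).foldl (pvBStep words) (0, none, false)
  if st.2.2 then st.2.1.map (PySem.Str.join " ") else none

-- ===== PRECONDITION & SPEC =====
def Spec_match_ingredient (ing : String) (ing_dict : List (String × String)) (out : Option String) : Prop := out = match_ingredient_alt ing ing_dict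
instance (ing : String) (ing_dict : List (String × String)) (out : Option String) : Decidable (Spec_match_ingredient ing ing_dict out) := by unfold Spec_match_ingredient; infer_instance

-- ===== CLAIM (what is proved, stated in full; the proofs are below) =====
def Claim_equal_match_ingredient : Prop := ∀ (ing : String) (ing_dict : List (String × String)), Dom_match_ingredient ing ing_dict → Spec_match_ingredient ing ing_dict (match_ingredient ing ing_dict)

-- ===== LEMMAS AND PROOFS =====

-- maximum prefix-match length over a list of split keys
def pvMaxP (words : List String) : List (List String) → Nat
  | [] => 0
  | m :: ms => max (pvPrefLen words m) (pvMaxP words ms)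

theorem pvPrefLen_le (ws m : List String) : pvPrefLen ws m ≤ ws.length := by
  induction ws generalizing m with
  | nil => simp [pvPrefLen]
  | cons w ws ih =>
    cases m with
    | nil => simp [pvPrefLen]
    | cons k ks =>
      simp only [pvPrefLen]
      split
      · exact Nat.succ_le_succ (ih ks)
      · exact Nat.zero_le _

theorem pvMaxP_le {words : List String} {ms : List (List String)} {c : Nat}
    (h : ∀ m ∈ ms, pvPrefLen words m ≤ c) : pvMaxP words ms ≤ c := by
  induction ms with
  | nil => exact Nat.zero_le _
  | cons m ms ih =>
    simp only [pvMaxP]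
    exact max_le (h m (by simp)) (ih (fun x hx => h x (by simp [hx])))

theorem le_pvMaxP {words : List String} {ms : List (List String)} {m : List String}
    (h : m ∈ ms) : pvPrefLen words m ≤ pvMaxP words ms := by
  induction ms with
  | nil => cases h
  | cons a ms ih =>
    simp only [pvMaxP]
    rcases List.mem_cons.mp h with rfl | h
    · exact le_max_left _ _
    · exact le_trans (ih h) (le_max_right _ _)

theorem pvMaxP_mem {words : List String} {ms : List (List String)} (h : ms ≠ []) :
    ∃ m ∈ ms, pvPrefLen words m = pvMaxP words ms := by
  induction ms with
  | nil => exact absurd rfl h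
  | cons a ms ih =>
    by_cases hn : ms = []
    · subst hn; exact ⟨a, by simp, by simp [pvMaxP]⟩
    · rcases ih hn with ⟨m, hm, hq⟩
      simp only [pvMaxP]
      rcases le_total (pvPrefLen words a) (pvMaxP words ms) with hle | hle
      · exact ⟨m, by simp [hm], by rw [hq, max_eq_right hle]⟩
      · exact ⟨a, by simp, by rw [max_eq_left hle]⟩

theorem pvMaxP_append (words : List String) (ms : List (List String)) (m : List String) :
    pvMaxP words (ms ++ [m]) = max (pvMaxP words ms) (pvPrefLen words m) := by
  induction ms with
  | nil => simp [pvMaxP]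
  | cons a ms ih => simp only [List.cons_append, pvMaxP, ih, max_assoc]

-- A's filter condition at position i selects exactly prefix length ≥ i+1, given ≥ i
theorem pvFilter_cond (words m : List String) (i : Nat) (hi : i < words.length)
    (hq : i ≤ pvPrefLen words m) :
    (decide (i < m.length) && (m.getD i "" == words.getD i "")) =
      decide (i + 1 ≤ pvPrefLen words m) := by
  induction i generalizing words m with
  | zero =>
    cases words with
    | nil => cases hi
    | cons w ws =>
      cases m with
      | nil => simp [pvPrefLen]
      | cons k ks =>
        simp only [pvPrefLen, List.getD_cons_zero, List.length_cons]
        by_cases hk : k = w <;> simp [hk]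
  | succ i ih =>
    cases words with
    | nil => cases hi
    | cons w ws =>
      cases m with
      | nil => simp [pvPrefLen] at hq
      | cons k ks =>
        simp only [pvPrefLen] at hq ⊢
        by_cases hk : k = w
        · simp only [hk] at hq ⊢
          have := ih ws ks (Nat.lt_of_succ_lt_succ hi) (Nat.le_of_succ_le_succ hq)
          simpa [List.getD_cons_succ, Nat.succ_le_succ_iff] using this
        · simp [hk] at hq

-- the common characterisation: result as a function of the max prefix length and its attainers
def pvRes (words : List String) (ms : List (List String)) (i : Nat) : Option String :=
  let M := pvMaxP words ms
  let G := ms.filter (fun m => decide (pvPrefLen words m = M))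
  if i < M ∧ G.length = 1 then some (PySem.Str.join " " (G.getD 0 [])) else none

theorem pvALoop_eq_pvRes (words : List String) (fuel i : Nat) (ms : List (List String))
    (hfi : i + fuel = words.length) (hinv : ∀ m ∈ ms, i ≤ pvPrefLen words m) :
    pvALoop words i fuel ms = pvRes words ms i := by
  induction fuel generalizing i ms with
  | zero =>
    have hM : pvMaxP words ms ≤ words.length := pvMaxP_le (fun m _ => pvPrefLen_le words m)
    simp only [pvALoop, pvRes]
    rw [if_neg]
    rintro ⟨hlt, -⟩
    omega
  | succ fuel ih =>
    have hi : i < words.length := by omega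
    have hfilter : ms.filter (fun m => decide (i < m.length) && (m.getD i "" == words.getD i ""))
        = ms.filter (fun m => decide (i + 1 ≤ pvPrefLen words m)) := by
      apply List.filter_congr
      intro m hm
      exact pvFilter_cond words m i hi (hinv m hm)
    simp only [pvALoop, hfilter]
    set F := ms.filter (fun m => decide (i + 1 ≤ pvPrefLen words m)) with hF
    have hFmem : ∀ m ∈ F, i + 1 ≤ pvPrefLen words m := by
      intro m hm
      have := List.of_mem_filter hm
      simpa using this
    have hFsub : ∀ m ∈ F, m ∈ ms := fun m hm => List.mem_of_mem_filter hm
    by_cases h1 : F.length = 1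
    · -- exactly one survivor: it attains the max and is the unique attainer
      rw [if_pos h1]
      rcases List.length_eq_one_iff.mp h1 with ⟨m0, hm0⟩
      have hm0F : m0 ∈ F := by simp [hm0]
      have hm0ms : m0 ∈ ms := hFsub m0 hm0F
      have hmsne : ms ≠ [] := by intro h; rw [h] at hm0ms; cases hm0ms
      rcases pvMaxP_mem (words := words) hmsne with ⟨m1, hm1, hq1⟩
      have hMge : i + 1 ≤ pvMaxP words ms := le_trans (hFmem m0 hm0F) (le_pvMaxP hm0ms)
      have hm1F : m1 ∈ F := by
        rw [hF]
        exact List.mem_filter.mpr ⟨hm1, by simpa [hq1] using hMge⟩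
      have hm1eq : m1 = m0 := by rw [hm0] at hm1F; simpa using hm1F
      have hq0 : pvPrefLen words m0 = pvMaxP words ms := hm1eq ▸ hq1
      have hG : ms.filter (fun m => decide (pvPrefLen words m = pvMaxP words ms)) = [m0] := by
        have hcomm : ms.filter (fun m => decide (pvPrefLen words m = pvMaxP words ms)) =
            F.filter (fun m => decide (pvPrefLen words m = pvMaxP words ms)) := by
          rw [hF, List.filter_filter]
          apply List.filter_congr
          intro m hm
          by_cases hqm : pvPrefLen words m = pvMaxP words ms
          · simp [hqm, hMge]
          · simp [hqm]
        rw [hcomm, hm0]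
        simp [hq0]
      simp only [pvRes, hG]
      rw [if_pos ⟨by omega, rfl⟩]
      simp [hm0]
    · rw [if_neg h1]
      by_cases h0 : F.length = 0
      · -- no survivor: nothing has prefix length > i, so the max is ≤ i
        rw [if_pos h0]
        have hFnil : F = [] := List.length_eq_zero_iff.mp h0
        simp only [pvRes]
        rw [if_neg]
        rintro ⟨hlt, -⟩
        have hmsne : ms ≠ [] := by
          intro h
          subst h
          simp [pvMaxP] at hlt
        rcases pvMaxP_mem (words := words) hmsne with ⟨m1, hm1, hq1⟩
        have : m1 ∈ F := by
          rw [hF]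
          exact List.mem_filter.mpr ⟨hm1, by simp [hq1]; omega⟩
        rw [hFnil] at this
        cases this
      · -- at least two survivors: recurse; max and attainer set are unchanged
        rw [if_neg h0]
        have h2 : 2 ≤ F.length := by omega
        have hFne : F ≠ [] := by intro h; rw [h] at h2; simp at h2
        rcases List.exists_mem_of_ne_nil F hFne with ⟨mf, hmf⟩
        have hMge : i + 1 ≤ pvMaxP words ms := le_trans (hFmem mf hmf) (le_pvMaxP (hFsub mf hmf))
        have ihres := ih (i + 1) F (by omega) hFmem
        rw [ihres]
        -- pvMaxP F = pvMaxP ms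
        have hmsne : ms ≠ [] := by
          intro h
          subst h
          simp [hF] at hFne
        rcases pvMaxP_mem (words := words) hmsne with ⟨m1, hm1, hq1⟩
        have hm1F : m1 ∈ F := by
          rw [hF]
          exact List.mem_filter.mpr ⟨hm1, by simpa [hq1] using hMge⟩
        have hMF : pvMaxP words F = pvMaxP words ms := by
          apply le_antisymm
          · exact pvMaxP_le (fun m hm => le_pvMaxP (hFsub m hm))
          · rw [← hq1]; exact le_pvMaxP hm1F
        have hGF : F.filter (fun m => decide (pvPrefLen words m = pvMaxP words ms)) =
            ms.filter (fun m => decide (pvPrefLen words m = pvMaxP words ms)) := by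
          rw [hF, List.filter_filter]
          apply List.filter_congr
          intro m hm
          by_cases hqm : pvPrefLen words m = pvMaxP words ms
          · simp [hqm, hMge]
          · simp [hqm]
        simp only [pvRes, hMF, hGF]
        set G := ms.filter (fun m => decide (pvPrefLen words m = pvMaxP words ms)) with hG
        by_cases hGlen : G.length = 1
        · -- a unique attainer: with ≥ 2 survivors at level i+1 the max must exceed i+1
          have hMgt : i + 1 < pvMaxP words ms := by
            rcases Nat.lt_or_ge (i + 1) (pvMaxP words ms) with h | h
            · exact h
            · exfalso
              have hMeq : pvMaxP words ms = i + 1 := le_antisymm h hMge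
              have hFG : F = G := by
                rw [hF, hG]
                apply List.filter_congr
                intro m hm
                have h2 := le_pvMaxP (words := words) (ms := ms) (m := m) hm
                rw [hMeq] at h2 ⊢
                simp only [decide_eq_decide]
                omega
              rw [hFG] at h2
              omega
          rw [if_pos ⟨hMgt, hGlen⟩, if_pos ⟨by omega, hGlen⟩]
        · rw [if_neg (by rintro ⟨-, h⟩; exact hGlen h), if_neg (by rintro ⟨-, h⟩; exact hGlen h)]

-- B's fold characterised by the same max / attainer data
theorem pvBFold_eq (words : List String) (ks : List String) :
    ks.foldl (pvBStep words) (0, none, false) =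
      (pvMaxP words (ks.map (fun k => pvSplit k)),
       (if 0 < pvMaxP words (ks.map (fun k => pvSplit k)) then
          ((ks.map (fun k => pvSplit k)).filter
            (fun m => decide (pvPrefLen words m = pvMaxP words (ks.map (fun k => pvSplit k))))).head?
        else none),
       (if 0 < pvMaxP words (ks.map (fun k => pvSplit k)) then
          decide (((ks.map (fun k => pvSplit k)).filter
            (fun m => decide (pvPrefLen words m = pvMaxP words (ks.map (fun k => pvSplit k))))).length = 1)
        else false)) := by
  induction ks using List.reverseRecOn with
  | nil => simp [pvMaxP]
  | append_singleton ks k ih =>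
    rw [List.foldl_append, List.foldl_cons, List.foldl_nil, ih]
    set ms := ks.map (fun k => pvSplit k) with hms
    set kw := pvSplit k with hkw
    set p := pvPrefLen words kw with hp
    set M := pvMaxP words ms with hM
    have hmap : (ks ++ [k]).map (fun k => pvSplit k) = ms ++ [kw] := by
      simp [hms, hkw]
    have hMnew : pvMaxP words (ms ++ [kw]) = max M p := pvMaxP_append words ms kw
    have hle : ∀ m ∈ ms, pvPrefLen words m ≤ M := fun m hm => le_pvMaxP hm
    rcases Nat.lt_trichotomy M p with hlt | heq | hgt
    · -- new strict maximum
      have hmax : max M p = p := max_eq_right (le_of_lt hlt)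
      have hGnil : ms.filter (fun m => decide (pvPrefLen words m = p)) = [] := by
        rw [List.filter_eq_nil_iff]
        intro m hm
        have := hle m hm
        simp
        omega
      simp only [pvBStep, hmap, hMnew, hmax, ← hkw, ← hp]
      rw [if_pos hlt]
      rw [List.filter_append, hGnil]
      simp [hp]
      omega
    · -- tie with the current maximum
      have hmax : max M p = M := max_eq_left (le_of_eq heq.symm)
      simp only [pvBStep, hmap, hMnew, hmax, ← hkw, ← hp]
      rw [if_neg (by omega)]
      by_cases hp0 : 0 < p
      · rw [if_pos ⟨heq.symm, hp0⟩]
        have hM0 : 0 < M := by omega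
        have hmsne : ms ≠ [] := by
          intro h
          rw [h] at hM
          simp [pvMaxP] at hM
          omega
        rcases pvMaxP_mem (words := words) hmsne with ⟨m1, hm1, hq1⟩
        have hGne : ms.filter (fun m => decide (pvPrefLen words m = M)) ≠ [] := by
          intro h
          have : m1 ∈ ms.filter (fun m => decide (pvPrefLen words m = M)) :=
            List.mem_filter.mpr ⟨hm1, by simp [hq1, hM]⟩
          rw [h] at this
          cases this
        rw [List.filter_append]
        have hkwG : [kw].filter (fun m => decide (pvPrefLen words m = M)) = [kw] := by
          simp [← hp, heq]
        rw [hkwG]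
        have hGlen : 1 ≤ (ms.filter (fun m => decide (pvPrefLen words m = M))).length := by
          rcases List.exists_mem_of_ne_nil _ hGne with ⟨g, hg⟩
          exact List.length_pos_of_mem hg
        simp only [if_pos hM0]
        refine Prod.ext rfl (Prod.ext ?_ ?_)
        · simp [List.head?_append_of_ne_nil _ hGne]
        · have hlen : ¬ ((ms.filter (fun m => decide (pvPrefLen words m = M)) ++ [kw]).length = 1) := by
            rw [List.length_append]
            simp only [List.length_cons, List.length_nil]
            omega
          exact (decide_eq_false hlen).symm
      · -- p = M = 0: state unchanged, nothing tracked yet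
        have hp0' : p = 0 := by omega
        have hM0 : M = 0 := by omega
        rw [if_neg (by rintro ⟨-, h⟩; omega)]
        simp [hM0]
    · -- below the current maximum: state unchanged
      have hmax : max M p = M := max_eq_left (le_of_lt hgt)
      simp only [pvBStep, hmap, hMnew, hmax, ← hkw, ← hp]
      rw [if_neg (by omega), if_neg (by rintro ⟨h, -⟩; omega)]
      have hkwG : [kw].filter (fun m => decide (pvPrefLen words m = M)) = [] := by
        simp [← hp]
        omega
      rw [List.filter_append, hkwG, List.append_nil]

-- ===== VERDICT (by name: the statement is the Claim_ definition above) =====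
theorem match_ingredient_spec : Claim_equal_match_ingredient := by
  intro ing ing_dict _
  unfold Spec_match_ingredient match_ingredient match_ingredient_alt
  set words := pvSplit ing with hwords
  set ks := (PySem.Dict.ofList ing_dict).keys with hks
  set ms := ks.map (fun k => pvSplit k) with hms
  rw [pvALoop_eq_pvRes words words.length 0 ms (by omega) (fun m _ => Nat.zero_le _)]
  simp only [pvBFold_eq words ks]
  simp only [pvRes, ← hms]
  set M := pvMaxP words ms with hM
  set G := ms.filter (fun m => decide (pvPrefLen words m = M)) with hG
  by_cases hc : 0 < M ∧ G.length = 1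
  · rw [if_pos hc]
    rcases List.length_eq_one_iff.mp hc.2 with ⟨g, hg⟩
    simp [hc.1, hg]
  · rw [if_neg hc]
    by_cases hM0 : 0 < M
    · have hGlen : ¬ G.length = 1 := fun h => hc ⟨hM0, h⟩
      simp [hM0, hGlen]
    · simp [hM0]
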